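-- pv_equiv track=rewrite | github.com/BartTych/Pictures | functional_filters.py | remove_exact_duplicates
-- ===== SOURCE A (Python) =====
-- from collections import defaultdict
--
-- def remove_exact_duplicates(images):
--     def hamming_distance(hash1, hash2):
--         return bin(int(hash1, 16) ^ int(hash2, 16)).count('1')
--
--     # Group by hash
--     hash_groups = defaultdict(list)
--     for img in images:
--         hash_groups[img['hash']].append(img)
--
--     deduped = []
--     for group in hash_groups.values():
--         if len(group) == 1:
--             deduped.append(group[0])
--             continue
--
--         # If multiple images have the same hash (hamming distance 0)
--         # and only one has a 'date', keep that one
--         with_date = [img for img in group if 'date' in img and img['date']]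
--         without_date = [img for img in group if 'date' not in img or not img['date']]
--
--         if len(with_date) == 1:
--             deduped.append(with_date[0])
--         else:
--             # If none or multiple have 'date', just keep the first
--             deduped.append(group[0])
--
--     return deduped
-- ===== SOURCE B (Python) =====
-- def remove_exact_duplicates(images):
--     # One pass: per hash keep (first-seen image, dated count, last dated image).
--     info = {}
--     for img in images:
--         h = img['hash']
--         first, count, dated = info.get(h, (img, 0, None))
--         if img.get('date'):
--             count += 1
--             dated = img
--         info[h] = (first, count, dated)
--     return [dated if count == 1 else first for (first, count, dated) in info.values()]
-- ===== Notes on version B (the rewrite author's own statement) =====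
-- stated objective: alternative
-- what changed: Group-then-select over a defaultdict of lists is replaced by a single pass keeping only (first-seen, dated-count, last-dated) aggregates per hash, so no per-hash group lists are built; the dead hamming_distance/without_date code is dropped.
-- outside the precondition, e.g. on remove_exact_duplicates([{'date': 'd'}]): A raises KeyError, B raises KeyError
import Mathlib
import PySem

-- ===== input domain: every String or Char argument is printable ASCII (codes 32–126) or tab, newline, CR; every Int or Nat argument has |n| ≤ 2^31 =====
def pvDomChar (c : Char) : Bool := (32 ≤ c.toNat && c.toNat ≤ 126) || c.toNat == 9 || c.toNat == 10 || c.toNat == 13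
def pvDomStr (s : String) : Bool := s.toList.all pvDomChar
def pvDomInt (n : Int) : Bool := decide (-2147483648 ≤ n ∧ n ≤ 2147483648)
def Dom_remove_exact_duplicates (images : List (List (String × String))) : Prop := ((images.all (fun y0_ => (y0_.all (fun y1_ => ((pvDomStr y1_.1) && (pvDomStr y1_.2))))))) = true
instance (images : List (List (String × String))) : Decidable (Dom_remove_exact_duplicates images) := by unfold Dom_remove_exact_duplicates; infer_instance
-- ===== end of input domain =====

-- B replaces group-then-select by a one-pass per-hash aggregate (first, dated count, last dated); return-value equivalence only, A mutates nothing.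

-- img['hash'] / img.get('date'): assoc-list lookup, first match (dict convention)
def pvLookup (img : List (String × String)) (k : String) : Option String :=
  (img.find? (fun p => p.1 == k)).map (·.2)

def pvKeyOf (img : List (String × String)) : String := (pvLookup img "hash").getD ""

-- 'date' in img and img['date'] (truthy string)
def pvDated (img : List (String × String)) : Bool :=
  match pvLookup img "date" with
  | some s => !(s == "")
  | none => false

-- ===== PORT A =====
-- (A's inner hamming_distance helper is dead code — never called — and is not ported.)
def pvSelectA (group : List (List (String × String))) : List (String × String) :=
  if group.length == 1 then group.headD []
  else
    let with_date := group.filter pvDated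
    if with_date.length == 1 then with_date.headD []
    else group.headD []

def remove_exact_duplicates (images : List (List (String × String))) : List (List (String × String)) :=
  let hash_groups := images.foldl
    (fun d img => d.modify (pvKeyOf img) [] (fun g => g ++ [img]))
    (PySem.Dict.empty : PySem.Dict String (List (List (String × String))))
  hash_groups.values.foldl (fun deduped group => deduped ++ [pvSelectA group]) []

-- ===== PORT B =====
def pvRec := List (String × String) × Int × Option (List (String × String))

def pvStepRec (r : pvRec) (img : List (String × String)) : pvRec :=
  if pvDated img then (r.1, r.2.1 + 1, some img) else r

def pvStepB (d : PySem.Dict String pvRec) (img : List (String × String)) : PySem.Dict String pvRec :=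
  let h := pvKeyOf img
  d.insert h (pvStepRec (d.getD h (img, 0, none)) img)

def pvSelectB (r : pvRec) : List (String × String) :=
  if r.2.1 == 1 then (r.2.2).getD r.1 else r.1

def remove_exact_duplicates_alt (images : List (List (String × String))) : List (List (String × String)) :=
  let info := images.foldl pvStepB (PySem.Dict.empty : PySem.Dict String pvRec)
  info.values.map pvSelectB

-- ===== PRECONDITION & SPEC =====
-- Pre_: every image must carry a 'hash' key — on any other input both Pythons raise KeyError at img['hash'].
def Pre_remove_exact_duplicates (images : List (List (String × String))) : Prop :=
  ∀ img ∈ images, ∃ p ∈ img, p.1 = "hash"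
instance (images : List (List (String × String))) : Decidable (Pre_remove_exact_duplicates images) := by unfold Pre_remove_exact_duplicates; infer_instance

def pvWitness_remove_exact_duplicates : (List (List (String × String))) :=
  [[("hash", "a"), ("date", "d1")], [("hash", "a")], [("hash", "b")]]

def Spec_remove_exact_duplicates (images : List (List (String × String))) (out : List (List (String × String))) : Prop := out = remove_exact_duplicates_alt images
instance (images : List (List (String × String))) (out : List (List (String × String))) : Decidable (Spec_remove_exact_duplicates images out) := by unfold Spec_remove_exact_duplicates; infer_instance

-- ===== CLAIM (what is proved, stated in full; the proofs are below) =====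
def Claim_equal_remove_exact_duplicates : Prop := ∀ (images : List (List (String × String))), Dom_remove_exact_duplicates images → Pre_remove_exact_duplicates images → Spec_remove_exact_duplicates images (remove_exact_duplicates images)

-- ===== LEMMAS AND PROOFS =====

-- A's groups: getD k [] = the images whose hash is k, in order
lemma groupsA_getD (l : List (List (String × String))) (k : String) :
    (l.foldl (fun d img => d.modify (pvKeyOf img) [] (fun g => g ++ [img]))
      (PySem.Dict.empty : PySem.Dict String (List (List (String × String))))).getD k []
    = l.filter (fun img => pvKeyOf img == k) := by
  have h : l.foldl (fun d img => d.modify (pvKeyOf img) [] (fun g => g ++ [img]))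
      (PySem.Dict.empty : PySem.Dict String (List (List (String × String))))
      = (l.map (fun img => (pvKeyOf img, img))).foldl
          (fun d p => d.modify p.1 [] (fun g => g ++ [p.2])) PySem.Dict.empty := by
    rw [List.foldl_map]
  rw [h, PySem.Dict.getD_foldl_modify_append]
  simp [List.filter_map, Function.comp_def]

-- B's get? after the fold = merge of d.get? with the k-group
def pvMerge (o : Option pvRec) (g : List (List (String × String))) : Option pvRec :=
  g.foldl (fun o img => some (pvStepRec (o.getD (img, 0, none)) img)) o

lemma foldB_get? (l : List (List (String × String))) (d : PySem.Dict String pvRec) (k : String) :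
    (l.foldl pvStepB d).get? k = pvMerge (d.get? k) (l.filter (fun img => pvKeyOf img == k)) := by
  induction l generalizing d with
  | nil => simp [pvMerge]
  | cons img rest ih =>
    rw [List.foldl_cons, ih, List.filter_cons]
    by_cases hk : pvKeyOf img = k
    · simp only [hk, beq_self_eq_true, if_pos]
      have hstep : (pvStepB d img).get? k
          = some (pvStepRec ((d.get? k).getD (img, 0, none)) img) := by
        simp [pvStepB, hk, PySem.Dict.getD_eq_get?_getD]
      rw [hstep]
      simp [pvMerge]
    · have hb : (pvKeyOf img == k) = false := by simp [hk]
      rw [hb]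
      simp only [Bool.false_eq_true, if_false]
      have hstep : (pvStepB d img).get? k = d.get? k := by
        simp only [pvStepB, PySem.Dict.get?_insert]
        rw [if_neg (fun h => hk h.symm)]
      rw [hstep]

lemma getLast?_cons_or (i : List (String × String)) (t : List (List (String × String)))
    (s : Option (List (String × String))) :
    ((i :: t).getLast?).or s = (t.getLast?).or (some i) := by
  cases t with
  | nil => simp
  | cons a u =>
    rw [List.getLast?_cons_cons]
    obtain ⟨y, hy⟩ := Option.isSome_iff_exists.mp (by simp [List.getLast?_cons] : (a :: u).getLast?.isSome)
    rw [hy]; rfl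

lemma merge_some (g : List (List (String × String))) (r : pvRec) :
    pvMerge (some r) g = some (g.foldl pvStepRec r) := by
  induction g generalizing r with
  | nil => rfl
  | cons i t ih => simp [pvMerge, List.foldl_cons] at ih ⊢; exact ih _

lemma foldRec_closed (g : List (List (String × String))) (f : List (String × String))
    (c : Int) (s : Option (List (String × String))) :
    g.foldl pvStepRec (f, c, s)
      = (f, c + ((g.filter pvDated).length : Int), ((g.filter pvDated).getLast?).or s) := by
  induction g generalizing c s with
  | nil => simp
  | cons i t ih =>
    rw [List.foldl_cons, List.filter_cons]
    by_cases hd : pvDated i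
    · rw [if_pos (by simp [hd])]
      show t.foldl pvStepRec (pvStepRec (f, c, s) i) = _
      rw [show pvStepRec (f, c, s) i = (f, c + 1, some i) by simp [pvStepRec, hd], ih]
      refine Prod.ext rfl (Prod.ext ?_ ?_)
      · show c + 1 + _ = c + _; push_cast [List.length_cons]; ring
      · show ((t.filter pvDated).getLast?).or (some i) = ((i :: t.filter pvDated).getLast?).or s
        rw [getLast?_cons_or]
    · rw [if_neg (by simp [hd])]
      show t.foldl pvStepRec (pvStepRec (f, c, s) i) = _
      rw [show pvStepRec (f, c, s) i = (f, c, s) by simp [pvStepRec, hd], ih]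

lemma merge_none_eq (g : List (List (String × String))) (hg : g ≠ []) :
    pvMerge none g = some (g.headD [], ((g.filter pvDated).length : Int), (g.filter pvDated).getLast?) := by
  obtain ⟨i, t, rfl⟩ := List.exists_cons_of_ne_nil hg
  show pvMerge (some (pvStepRec (i, 0, none) i)) t = _
  rw [merge_some, List.filter_cons]
  by_cases hd : pvDated i
  · rw [if_pos (by simp [hd])]
    rw [show pvStepRec (i, 0, none) i = (i, 1, some i) by simp [pvStepRec, hd], foldRec_closed]
    simp only [List.headD_cons]
    refine congrArg some (Prod.ext rfl (Prod.ext ?_ ?_))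
    · show 1 + _ = _; push_cast [List.length_cons]; ring
    · show ((t.filter pvDated).getLast?).or (some i) = (i :: t.filter pvDated).getLast?
      rw [← getLast?_cons_or i (t.filter pvDated) none, Option.or_none]
  · rw [if_neg (by simp [hd])]
    rw [show pvStepRec (i, 0, none) i = (i, 0, none) by simp [pvStepRec, hd], foldRec_closed]
    simp only [List.headD_cons, Option.or_none, Int.zero_add]
    rfl

lemma select_agree (g : List (List (String × String))) (hg : g ≠ []) :
    pvSelectA g = pvSelectB (g.headD [], ((g.filter pvDated).length : Int), (g.filter pvDated).getLast?) := by
  obtain ⟨i, t, rfl⟩ := List.exists_cons_of_ne_nil hg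
  unfold pvSelectA pvSelectB
  by_cases hw : ((i :: t).filter pvDated).length = 1
  · obtain ⟨x, hx⟩ := List.length_eq_one_iff.mp hw
    by_cases h1 : (i :: t).length = 1
    · have ht : t = [] := by cases t <;> simp_all
      subst ht
      have hxi : x = i := by
        by_cases hd : pvDated i
        · simpa [List.filter_cons, hd] using hx.symm
        · simp [hd] at hx
      simp [hx, hxi]
    · simp [hx]
      intro ht; subst ht; simp at h1
  · have hb : ((((i :: t).filter pvDated).length : Int) == 1) = false := by
      simp; omega
    by_cases h1 : (i :: t).length = 1 <;> simp [h1, hw, hb]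

-- ===== VERDICT (by name: the statement is the Claim_ definition above) =====
theorem remove_exact_duplicates_spec : Claim_equal_remove_exact_duplicates := by
  intro images _ _
  unfold Spec_remove_exact_duplicates remove_exact_duplicates remove_exact_duplicates_alt
  dsimp only
  rw [show pvStepB = (fun (d : PySem.Dict String pvRec) img =>
        d.insert (pvKeyOf img) (pvStepRec (d.getD (pvKeyOf img) (img, 0, none)) img)) from rfl]
  have hkA : (images.foldl (fun d img => d.modify (pvKeyOf img) [] (fun g => g ++ [img]))
      (PySem.Dict.empty : PySem.Dict String (List (List (String × String))))).keys
      = PySem.Set.ofList (images.map pvKeyOf) := by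
    simpa [PySem.Set.update_nil_left] using
      PySem.Dict.keys_foldl_modify_key images pvKeyOf [] (fun _ img g => g ++ [img]) PySem.Dict.empty
  have hnA : (images.foldl (fun d img => d.modify (pvKeyOf img) [] (fun g => g ++ [img]))
      (PySem.Dict.empty : PySem.Dict String (List (List (String × String))))).keys.Nodup :=
    PySem.Dict.nodup_keys_foldl_modify_key images pvKeyOf [] (fun _ img g => g ++ [img])
      PySem.Dict.empty (by simp)
  have hkB : (images.foldl (fun (d : PySem.Dict String pvRec) img =>
      d.insert (pvKeyOf img) (pvStepRec (d.getD (pvKeyOf img) (img, 0, none)) img))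
      PySem.Dict.empty).keys = PySem.Set.ofList (images.map pvKeyOf) := by
    simpa [PySem.Set.update_nil_left] using
      PySem.Dict.keys_foldl_insert_key images pvKeyOf
        (fun d img => pvStepRec (d.getD (pvKeyOf img) (img, 0, none)) img) PySem.Dict.empty
  have hnB : (images.foldl (fun (d : PySem.Dict String pvRec) img =>
      d.insert (pvKeyOf img) (pvStepRec (d.getD (pvKeyOf img) (img, 0, none)) img))
      PySem.Dict.empty).keys.Nodup :=
    PySem.Dict.nodup_keys_foldl_insert_key images pvKeyOf
      (fun d img => pvStepRec (d.getD (pvKeyOf img) (img, 0, none)) img) PySem.Dict.empty (by simp)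
  rw [PySem.List.foldl_append_singleton_eq_map pvSelectA]
  rw [PySem.Dict.values_eq_map_keys _ hnA [], PySem.Dict.values_eq_map_keys _ hnB ([], 0, none)]
  rw [List.map_map, List.map_map, hkA, hkB, List.nil_append]
  refine List.map_congr_left ?_
  intro k hk
  obtain ⟨i, hi, hik⟩ := List.mem_map.mp ((PySem.Set.mem_ofList _ _).mp hk)
  have hgne : images.filter (fun img => pvKeyOf img == k) ≠ [] :=
    List.ne_nil_of_mem (List.mem_filter.mpr ⟨hi, by simp [hik]⟩)
  have hB : (images.foldl (fun (d : PySem.Dict String pvRec) img =>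
      d.insert (pvKeyOf img) (pvStepRec (d.getD (pvKeyOf img) (img, 0, none)) img))
      PySem.Dict.empty).get? k
      = some ((images.filter (fun img => pvKeyOf img == k)).headD [],
          (((images.filter (fun img => pvKeyOf img == k)).filter pvDated).length : Int),
          ((images.filter (fun img => pvKeyOf img == k)).filter pvDated).getLast?) := by
    rw [show (fun (d : PySem.Dict String pvRec) img =>
        d.insert (pvKeyOf img) (pvStepRec (d.getD (pvKeyOf img) (img, 0, none)) img)) = pvStepB from rfl]
    rw [foldB_get?, PySem.Dict.get?_empty]
    exact merge_none_eq _ hgne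
  show pvSelectA _ = pvSelectB _
  beta_reduce
  rw [groupsA_getD, PySem.Dict.getD_of_get?_eq_some _ _ hB]
  exact select_agree _ hgne
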